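-- pv_equiv track=rewrite | github.com/HansDanielsson/Python-Intro | Tentamen/181102/Task4.py | findrev
-- ===== SOURCE A (Python) =====
-- def findrev(s1, s2, i):
--   revs2 = ""
--   for l in range(len(s2)):
--     revs2 = s2[l] + revs2
--
--   m = 0
--   while m <= len(s1) - len(s2):
--     if s1[m] == revs2[0]:
--       found = True
--       for ri in range(len(s2)):
--         if revs2[ri] != s1[m+ri]:
--           found = False
--       if found:
--         return m
--     m += 1
--   return i
-- ===== SOURCE B (Python) =====
-- def findrev(s1, s2, i):
--     k = s1.find(s2[::-1])
--     return k if k != -1 else i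
-- ===== Notes on version B (the rewrite author's own statement) =====
-- stated objective: idiomatic
-- what changed: replaces the hand-rolled reversal loop and quadratic character-by-character scan with a single str.find on the slice-reversed pattern
-- crash fix: A raises IndexError whenever s2 is empty (revs2[0] / s1[0] out of range); B returns 0 there (the empty pattern matches at index 0). — e.g. on findrev("ab", "", 7): A raises IndexError, B returns 0
import Mathlib
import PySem

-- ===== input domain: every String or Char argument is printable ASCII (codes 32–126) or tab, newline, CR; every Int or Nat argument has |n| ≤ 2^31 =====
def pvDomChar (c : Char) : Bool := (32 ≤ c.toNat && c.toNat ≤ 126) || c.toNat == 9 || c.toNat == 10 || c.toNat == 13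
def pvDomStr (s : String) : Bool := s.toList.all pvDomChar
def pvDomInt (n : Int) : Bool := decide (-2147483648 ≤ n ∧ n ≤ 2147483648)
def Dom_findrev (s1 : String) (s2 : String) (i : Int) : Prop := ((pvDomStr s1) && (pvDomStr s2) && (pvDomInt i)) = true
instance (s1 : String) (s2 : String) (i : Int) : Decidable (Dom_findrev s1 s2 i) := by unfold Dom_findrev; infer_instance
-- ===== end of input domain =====

-- B replaces A's hand-rolled reversal loop and window-by-window character scan with one find of the
-- slice-reversed pattern (idiomatic); same return value on every input where A returns (s2 ≠ "").

-- ===== PORT A =====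
-- A's while-loop; fuel bounds the number of guard checks (l1.length + 1 always suffices)
def findrevGo (l1 revs2 : List Char) (len2 : Nat) (i : Int) (m : Nat) : Nat → Int
  | 0 => i
  | fuel+1 =>
    if (m : Int) ≤ (l1.length : Int) - (len2 : Int) then
      if PySem.List.pyGetD l1 (m : Int) ' ' = PySem.List.pyGetD revs2 0 ' ' then
        let found := (List.range len2).foldl
          (fun (f : Bool) (ri : Nat) => if PySem.List.pyGetD revs2 (ri : Int) ' ' ≠ PySem.List.pyGetD l1 ((m : Int) + (ri : Int)) ' ' then false else f) true
        if found then (m : Int) else findrevGo l1 revs2 len2 i (m+1) fuel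
      else findrevGo l1 revs2 len2 i (m+1) fuel
    else i

def findrev (s1 : String) (s2 : String) (i : Int) : Int :=
  let l1 := s1.toList
  let l2 := s2.toList
  let revs2 := (List.range l2.length).foldl (fun (acc : List Char) (l : Nat) => PySem.List.pyGetD l2 (l : Int) ' ' :: acc) []
  findrevGo l1 revs2 l2.length i 0 (l1.length + 1)

-- ===== PORT B =====
def findrev_alt (s1 : String) (s2 : String) (i : Int) : Int :=
  let k := PySem.Chars.find s1.toList s2.toList.reverse
  if k ≠ -1 then k else i

-- ===== PRECONDITION & SPEC =====
-- Pre_ excludes only s2 = "", on which A raises IndexError (revs2[0] / s1[0] is out of range).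
def Pre_findrev (s1 : String) (s2 : String) (i : Int) : Prop := s2 ≠ ""
instance (s1 : String) (s2 : String) (i : Int) : Decidable (Pre_findrev s1 s2 i) := by unfold Pre_findrev; infer_instance
def pvWitness_findrev : String × String × Int := ("abcbc", "cb", -1)

-- A raises IndexError whenever s2 is empty; B returns 0 there (the empty pattern matches at index 0).
def Raises_findrev (s1 : String) (s2 : String) (i : Int) : Prop := s2 = ""
instance (s1 : String) (s2 : String) (i : Int) : Decidable (Raises_findrev s1 s2 i) := by unfold Raises_findrev; infer_instance
def pvRaiseWitness_findrev : String × String × Int := ("ab", "", 7)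
def pvRaiseWitnessOut_findrev : Int := 0

def Spec_findrev (s1 : String) (s2 : String) (i : Int) (out : Int) : Prop := out = findrev_alt s1 s2 i
instance (s1 : String) (s2 : String) (i : Int) (out : Int) : Decidable (Spec_findrev s1 s2 i out) := by unfold Spec_findrev; infer_instance

-- ===== CLAIM (what is proved, stated in full; the proofs are below) =====
def Claim_equal_findrev : Prop := ∀ (s1 : String) (s2 : String) (i : Int), Dom_findrev s1 s2 i → Pre_findrev s1 s2 i → Spec_findrev s1 s2 i (findrev s1 s2 i)
def Claim_raises_findrev : Prop := (∀ (s1 : String) (s2 : String) (i : Int), Dom_findrev s1 s2 i → Raises_findrev s1 s2 i → ¬ Pre_findrev s1 s2 i) ∧ (Dom_findrev (pvRaiseWitness_findrev.1) (pvRaiseWitness_findrev.2.1) (pvRaiseWitness_findrev.2.2) ∧ Raises_findrev (pvRaiseWitness_findrev.1) (pvRaiseWitness_findrev.2.1) (pvRaiseWitness_findrev.2.2) ∧ findrev_alt (pvRaiseWitness_findrev.1) (pvRaiseWitness_findrev.2.1) (pvRaiseWitness_findrev.2.2) = pvRaiseWitnessOut_findrev)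

-- ===== LEMMAS AND PROOFS =====

-- A's reversal loop builds the reverse of the list
lemma revFold_aux (l2 : List Char) : ∀ n, n ≤ l2.length →
    (List.range n).foldl (fun (acc : List Char) (l : Nat) => PySem.List.pyGetD l2 (l : Int) ' ' :: acc) [] = (l2.take n).reverse := by
  intro n
  induction n with
  | zero => simp
  | succ k ih =>
    intro h
    have hk : k < l2.length := by omega
    rw [List.range_succ, List.foldl_append, ih (by omega)]
    simp only [List.foldl_cons, List.foldl_nil]
    rw [PySem.List.pyGetD_natCast, List.getD_eq_getElem _ _ hk,
      ← List.take_concat_get (l := l2) (i := k) hk, List.concat_eq_append,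
      List.reverse_append, List.reverse_singleton, List.singleton_append]

lemma revFold_eq (l2 : List Char) :
    (List.range l2.length).foldl (fun (acc : List Char) (l : Nat) => PySem.List.pyGetD l2 (l : Int) ' ' :: acc) [] = l2.reverse := by
  rw [revFold_aux l2 l2.length le_rfl, List.take_length]

-- the inner fold of A checks every position of the window
lemma innerFold_iff (l2r l1 : List Char) (m n : Nat) :
    ((List.range n).foldl
      (fun (f : Bool) (ri : Nat) => if PySem.List.pyGetD l2r (ri : Int) ' ' ≠ PySem.List.pyGetD l1 ((m : Int) + (ri : Int)) ' ' then false else f) true) = true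
    ↔ ∀ ri < n, PySem.List.pyGetD l2r (ri : Int) ' ' = PySem.List.pyGetD l1 ((m : Int) + (ri : Int)) ' ' := by
  induction n with
  | zero => simp
  | succ k ih =>
    rw [List.range_succ, List.foldl_append]
    simp only [List.foldl_cons, List.foldl_nil]
    by_cases hne : PySem.List.pyGetD l2r (k : Int) ' ' = PySem.List.pyGetD l1 ((m : Int) + (k : Int)) ' '
    · rw [if_neg (by simpa using hne), ih]
      constructor
      · intro h ri hri
        rcases Nat.lt_succ_iff_lt_or_eq.mp hri with h' | h'
        · exact h ri h'
        · subst h'; exact hne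
      · intro h ri hri; exact h ri (by omega)
    · rw [if_pos (by simpa using hne)]
      constructor
      · intro h; exact absurd h (by simp)
      · intro h; exact absurd (h k (by omega)) hne

-- positionwise equality over the window is exactly prefix-of-drop
lemma prefix_iff_allEq (l2r l1 : List Char) (m : Nat) (hlen : m + l2r.length ≤ l1.length) :
    l2r <+: l1.drop m ↔ ∀ ri < l2r.length, PySem.List.pyGetD l2r (ri : Int) ' ' = PySem.List.pyGetD l1 ((m : Int) + (ri : Int)) ' ' := by
  rw [List.prefix_iff_getElem?]
  constructor
  · intro h ri hri
    have hm : m + ri < l1.length := by omega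
    have h1 := h ri hri
    rw [List.getElem?_drop, List.getElem?_eq_getElem hm] at h1
    have hcast : (m : Int) + (ri : Int) = ((m + ri : Nat) : Int) := by push_cast; ring
    rw [hcast, PySem.List.pyGetD_natCast, PySem.List.pyGetD_natCast,
      List.getD_eq_getElem _ _ hri, List.getD_eq_getElem _ _ hm]
    exact (Option.some.inj h1).symm
  · intro h ri hri
    have hm : m + ri < l1.length := by omega
    have h1 := h ri hri
    have hcast : (m : Int) + (ri : Int) = ((m + ri : Nat) : Int) := by push_cast; ring
    rw [hcast, PySem.List.pyGetD_natCast, PySem.List.pyGetD_natCast,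
      List.getD_eq_getElem _ _ hri, List.getD_eq_getElem _ _ hm] at h1
    rw [List.getElem?_drop, List.getElem?_eq_getElem hm, h1]

lemma find_eq_of_first (l1 l2r : List Char) (m : Nat)
    (hpre : l2r <+: l1.drop m) (hmin : ∀ j, j < m → ¬ l2r <+: l1.drop j) :
    PySem.Chars.find l1 l2r = (m : Int) := by
  have hinf : l2r <:+: l1 := (PySem.Chars.isIn_iff_infix _ _).mp
    ((PySem.Chars.exists_prefix_drop_iff_isIn _ _).mp ⟨m, hpre⟩)
  have hnn : 0 ≤ PySem.Chars.find l1 l2r := (PySem.Chars.find_nonneg_iff _ _).mpr hinf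
  obtain ⟨hp, hmin'⟩ := PySem.Chars.find_spec hnn
  have h1 : ¬ (PySem.Chars.find l1 l2r).toNat < m := fun h => hmin _ h hp
  have h2 : ¬ m < (PySem.Chars.find l1 l2r).toNat := fun h => hmin' m h hpre
  omega

lemma find_eq_neg_of_none (l1 l2r : List Char) (h : ∀ j, ¬ l2r <+: l1.drop j) :
    PySem.Chars.find l1 l2r = -1 := by
  rw [PySem.Chars.find_eq_neg_one_iff]
  intro hinf
  obtain ⟨j, hj⟩ := (PySem.Chars.exists_prefix_drop_iff_isIn _ _).mpr
    ((PySem.Chars.isIn_iff_infix _ _).mpr hinf)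
  exact h j hj

-- A's scan returns the first occurrence of the reversed pattern, i when there is none
lemma goA_spec (l1 l2r : List Char) (i : Int) (h2 : l2r ≠ []) :
    ∀ fuel m, l1.length + 1 ≤ m + fuel → (∀ j, j < m → ¬ l2r <+: l1.drop j) →
    findrevGo l1 l2r l2r.length i m fuel =
      if PySem.Chars.find l1 l2r = -1 then i else PySem.Chars.find l1 l2r := by
  intro fuel
  induction fuel with
  | zero =>
    intro m hm hmin
    have hnone : ∀ j, ¬ l2r <+: l1.drop j := by
      intro j hj
      by_cases h : j < m
      · exact hmin j h hj
      · have : l1.length ≤ j := by omega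
        rw [List.drop_eq_nil_of_le this] at hj
        exact h2 (List.prefix_nil.mp hj)
    rw [findrevGo, find_eq_neg_of_none l1 l2r hnone, if_pos rfl]
  | succ fuel ih =>
    intro m hm hmin
    rw [findrevGo]
    by_cases hg : (m : Int) ≤ (l1.length : Int) - (l2r.length : Int)
    · have hlen : m + l2r.length ≤ l1.length := by omega
      rw [if_pos hg]
      by_cases hpre : l2r <+: l1.drop m
      · have hall := (prefix_iff_allEq l2r l1 m hlen).mp hpre
        have h0 : 0 < l2r.length := List.length_pos_iff.mpr h2
        have hfc : PySem.List.pyGetD l1 (m : Int) ' ' = PySem.List.pyGetD l2r 0 ' ' := by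
          have := hall 0 h0
          simpa using this.symm
        rw [if_pos hfc]
        have hfound : ((List.range l2r.length).foldl
            (fun (f : Bool) (ri : Nat) => if PySem.List.pyGetD l2r (ri : Int) ' ' ≠ PySem.List.pyGetD l1 ((m : Int) + (ri : Int)) ' ' then false else f) true) = true :=
          (innerFold_iff l2r l1 m l2r.length).mpr hall
        simp only [hfound, if_true]
        have hfind := find_eq_of_first l1 l2r m hpre hmin
        rw [hfind, if_neg (by omega)]
      · have hrec := ih (m+1) (by omega) (by
          intro j hj
          rcases Nat.lt_succ_iff_lt_or_eq.mp hj with h | h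
          · exact hmin j h
          · subst h; exact hpre)
        by_cases hfc : PySem.List.pyGetD l1 (m : Int) ' ' = PySem.List.pyGetD l2r 0 ' '
        · rw [if_pos hfc]
          have hfound : ((List.range l2r.length).foldl
              (fun (f : Bool) (ri : Nat) => if PySem.List.pyGetD l2r (ri : Int) ' ' ≠ PySem.List.pyGetD l1 ((m : Int) + (ri : Int)) ' ' then false else f) true) = false := by
            by_contra h
            rw [Bool.not_eq_false] at h
            exact hpre ((prefix_iff_allEq l2r l1 m hlen).mpr
              ((innerFold_iff l2r l1 m l2r.length).mp h))
          simp only [hfound]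
          exact hrec
        · rw [if_neg hfc]
          exact hrec
    · rw [if_neg hg]
      have hnone : ∀ j, ¬ l2r <+: l1.drop j := by
        intro j hj
        by_cases h : j < m
        · exact hmin j h hj
        · have h0 : 0 < l2r.length := List.length_pos_iff.mpr h2
          have hle := hj.length_le
          rw [List.length_drop] at hle
          omega
      rw [find_eq_neg_of_none l1 l2r hnone, if_pos rfl]

-- ===== VERDICT (by name: the statement is the Claim_ definition above) =====
theorem findrev_spec : Claim_equal_findrev := by
  intro s1 s2 i _ hp
  unfold Spec_findrev
  simp only [findrev, findrev_alt]
  have h2 : s2.toList ≠ [] := by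
    intro h
    exact hp (by simpa [String.toList_eq_nil_iff] using h)
  have h2r : s2.toList.reverse ≠ [] := by simpa using h2
  rw [revFold_eq]
  rw [show s2.toList.length = s2.toList.reverse.length from (List.length_reverse).symm]
  rw [goA_spec s1.toList s2.toList.reverse i h2r (s1.toList.length + 1) 0 (by omega)
    (fun j hj => absurd hj (Nat.not_lt_zero j))]
  by_cases hf : PySem.Chars.find s1.toList s2.toList.reverse = -1 <;> simp [hf]

def findrev_raises : Claim_raises_findrev := by
  unfold Claim_raises_findrev
  exact ⟨fun s1 s2 i _ hr hp => hp hr, by decide⟩
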